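-- pv_equiv track=rewrite | github.com/mitenevav/Mathematical-statistics | calibration.py | getTemperature1
-- ===== SOURCE A (Python) =====
-- def getTemperature1(table, arr):
--     num = [i for i in range(len(arr))]
--     ptr = sorted(zip(arr, num))
--     num = [x for _, x in ptr]
--     marr = arr.copy()
--     marr.sort()
--
--     res = []
--
--     j = 0
--     i = 0
--     while i < len(marr):
--         while j < len(table[0]):
--             if table[0][j] >= marr[i]:
--                 break
--             j += 1
--
--         if j == len(table[0]):
--             j -= 1
--             break
--
--         res.append(table[1][j])
--         i += 1
--
--     while i < len(marr):
--         res.append(table[1][j])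
--         i += 1
--
--     ptr = sorted(zip(num, res))
--     res = [x for _, x in ptr]
--     return res
-- ===== SOURCE B (Python) =====
-- def getTemperature1(table, arr):
--     res = []
--     for v in arr:
--         for j, t in enumerate(table[0]):
--             if t >= v:
--                 break
--         else:
--             j = len(table[0]) - 1
--         res.append(table[1][j])
--     return res
-- ===== Notes on version B (the rewrite author's own statement) =====
-- stated objective: simpler
-- what changed: B drops A's sort/merge/unsort machinery (sort value-index pairs, advance a shared pointer through table[0] over the sorted values, then sort the results back) and instead maps each value of arr in original order to table[1][j] for the first j with table[0][j] >= v, falling back to the last index when no threshold matches.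
import Mathlib
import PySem

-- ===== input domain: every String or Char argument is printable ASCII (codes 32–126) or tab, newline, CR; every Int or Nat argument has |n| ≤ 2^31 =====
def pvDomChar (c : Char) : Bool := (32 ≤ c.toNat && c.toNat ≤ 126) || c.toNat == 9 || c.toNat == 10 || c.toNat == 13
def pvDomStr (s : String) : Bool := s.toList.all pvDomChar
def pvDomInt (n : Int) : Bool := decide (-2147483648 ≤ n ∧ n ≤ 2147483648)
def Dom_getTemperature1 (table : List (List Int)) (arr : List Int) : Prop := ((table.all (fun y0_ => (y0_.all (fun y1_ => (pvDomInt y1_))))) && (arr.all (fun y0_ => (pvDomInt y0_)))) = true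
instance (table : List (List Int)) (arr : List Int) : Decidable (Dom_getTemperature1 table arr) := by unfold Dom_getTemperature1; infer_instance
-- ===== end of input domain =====

-- B replaces A's sort / pointer-merge / unsort pipeline by a direct per-element first-threshold
-- lookup in the original order of arr (objective: simpler).
-- Table accesses are totalized with pyGetD/getD defaults; Pre_ excludes exactly the inputs where
-- the Python raises, so the defaults are never what the claim is about.

-- ===== PORT A =====
-- inner `while j < len(table[0]): if table[0][j] >= marr[i]: break; j += 1`
def scanA (t0 : List Int) (v : Int) (j : Nat) : Nat :=
  if h : j < t0.length then
    if v ≤ t0[j]! then j else scanA t0 v (j + 1)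
  else j
termination_by t0.length - j

-- outer `while i < len(marr)` together with the trailing fill loop after the `break`
def loopA (t0 t1 : List Int) (marr : List Int) (j : Nat) : List Int :=
  match marr with
  | [] => []
  | v :: rest =>
    let j' := scanA t0 v j
    if j' = t0.length then
      -- `j -= 1; break` and the second while: table[1][j] for every remaining element
      (v :: rest).map (fun _ => PySem.List.pyGetD t1 ((t0.length : Int) - 1) 0)
    else
      PySem.List.pyGetD t1 (j' : Int) 0 :: loopA t0 t1 rest j'

def getTemperature1 (table : List (List Int)) (arr : List Int) : List Int :=
  let num := PySem.List.pyRange 0 (arr.length : Int)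
  let ptr := PySem.List.sorted2 (arr.zip num) Prod.fst Prod.snd
  let num2 := ptr.map Prod.snd
  let marr := PySem.List.sorted arr (fun x => x)
  let res := loopA ((PySem.List.pyGet? table 0).getD []) ((PySem.List.pyGet? table 1).getD []) marr 0
  let ptr2 := PySem.List.sorted2 (num2.zip res) Prod.fst Prod.snd
  ptr2.map Prod.snd

-- ===== PORT B =====
-- `for j, t in enumerate(table[0]): if t >= v: break` (first matching index, none if the loop falls through)
def scanB (v : Int) : List Int → Option Nat
  | [] => none
  | t :: rest => if v ≤ t then some 0 else (scanB v rest).map (· + 1)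

def lookupB (t0 t1 : List Int) (v : Int) : Int :=
  match scanB v t0 with
  | some j => PySem.List.pyGetD t1 (j : Int) 0
  | none => PySem.List.pyGetD t1 ((t0.length : Int) - 1) 0   -- `else: j = len(table[0]) - 1`

def getTemperature1_alt (table : List (List Int)) (arr : List Int) : List Int :=
  arr.map (lookupB ((PySem.List.pyGet? table 0).getD []) ((PySem.List.pyGet? table 1).getD []))

-- ===== PRECONDITION & SPEC =====
-- Pre_ = exactly the inputs on which the Python A returns: either arr is empty (table never touched),
-- or table has rows 0 and 1 and for every value the looked-up table[1] index is in range
-- (Python indexing: index -1, arising only for empty table[0], needs table[1] nonempty).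
def Pre_getTemperature1 (table : List (List Int)) (arr : List Int) : Prop :=
  arr = [] ∨ (2 ≤ table.length ∧ ∀ v ∈ arr,
    (PySem.List.pyGet? ((PySem.List.pyGet? table 1).getD [])
      (match ((PySem.List.pyGet? table 0).getD []).findIdx? (fun t => v ≤ t) with
       | some j => (j : Int)
       | none => (((PySem.List.pyGet? table 0).getD []).length : Int) - 1)).isSome)
instance (table : List (List Int)) (arr : List Int) : Decidable (Pre_getTemperature1 table arr) := by
  unfold Pre_getTemperature1; infer_instance
def pvWitness_getTemperature1 : List (List Int) × List Int := ([[0, 10], [5, 7]], [3, 20])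

def Spec_getTemperature1 (table : List (List Int)) (arr : List Int) (out : List Int) : Prop := out = getTemperature1_alt table arr
instance (table : List (List Int)) (arr : List Int) (out : List Int) : Decidable (Spec_getTemperature1 table arr out) := by unfold Spec_getTemperature1; infer_instance

-- ===== CLAIM (what is proved, stated in full; the proofs are below) =====
def Claim_equal_getTemperature1 : Prop := ∀ (table : List (List Int)) (arr : List Int), Dom_getTemperature1 table arr → Pre_getTemperature1 table arr → Spec_getTemperature1 table arr (getTemperature1 table arr)

-- ===== LEMMAS AND PROOFS =====

lemma scanB_some {v : Int} : ∀ {t0 : List Int} {m : Nat}, scanB v t0 = some m →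
    m < t0.length ∧ v ≤ t0[m]! ∧ ∀ k < m, t0[k]! < v := by
  intro t0
  induction t0 with
  | nil => intro m h; simp [scanB] at h
  | cons t rest ih =>
    intro m h
    by_cases hv : v ≤ t
    · simp [scanB, hv] at h
      subst h
      refine ⟨by simp, by simpa using hv, by omega⟩
    · simp [scanB, hv] at h
      obtain ⟨m', hm', rfl⟩ := h
      obtain ⟨h1, h2, h3⟩ := ih hm'
      refine ⟨by simpa using h1, by simpa using h2, ?_⟩
      intro k hk
      cases k with
      | zero => simpa using not_le.mp hv
      | succ k => simpa using h3 k (by omega)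

lemma scanB_none_iff {v : Int} : ∀ {t0 : List Int}, scanB v t0 = none ↔ ∀ k < t0.length, t0[k]! < v := by
  intro t0
  induction t0 with
  | nil => simp [scanB]
  | cons t rest ih =>
    by_cases hv : v ≤ t
    · constructor
      · intro h; simp [scanB, hv] at h
      · intro h; exact absurd hv (not_le.mpr (by simpa using h 0 (by simp)))
    · simp only [scanB, if_neg hv, Option.map_eq_none_iff, ih]
      constructor
      · intro h k hk
        cases k with
        | zero => simpa using not_le.mp hv
        | succ k => simpa using h k (by simpa using hk)
      · intro h k hk
        simpa using h (k + 1) (by simpa using Nat.succ_lt_succ hk)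

lemma scanA_some {t0 : List Int} {v : Int} {m : Nat} (hm : scanB v t0 = some m) :
    ∀ n j, m - j = n → (∀ k < j, t0[k]! < v) → scanA t0 v j = m := by
  obtain ⟨hlen, hge, hmin⟩ := scanB_some hm
  intro n
  induction n with
  | zero =>
    intro j h0 hlow
    have hjm : m ≤ j := by omega
    have : j = m := by
      by_contra hne
      exact absurd hge (not_le.mpr (hlow m (by omega)))
    subst this
    rw [scanA, dif_pos hlen, if_pos hge]
  | succ n ih =>
    intro j h0 hlow
    have hjm : j < m := by
      rcases Nat.lt_or_ge j m with h | h
      · exact h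
      · exact absurd hge (not_le.mpr (hlow m (by omega)))
    rw [scanA, dif_pos (by omega : j < t0.length),
        if_neg (not_le.mpr (hmin j hjm))]
    refine ih (j + 1) (by omega) ?_
    intro k hk
    rcases Nat.lt_or_ge k j with h | h
    · exact hlow k h
    · have : k = j := by omega
      subst this
      exact hmin k hjm

lemma scanA_none {t0 : List Int} {v : Int} (hm : scanB v t0 = none) :
    ∀ n j, t0.length - j = n → j ≤ t0.length → scanA t0 v j = t0.length := by
  have hall := scanB_none_iff.mp hm
  intro n
  induction n with
  | zero =>
    intro j h0 hj
    have : j = t0.length := by omega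
    subst this
    rw [scanA, dif_neg (by omega)]
  | succ n ih =>
    intro j h0 hj
    have hjl : j < t0.length := by omega
    rw [scanA, dif_pos hjl, if_neg (not_le.mpr (hall j hjl))]
    exact ih (j + 1) (by omega) (by omega)

lemma loopA_eq_map (t0 t1 : List Int) :
    ∀ (marr : List Int) (j : Nat), j ≤ t0.length → marr.Pairwise (· ≤ ·) →
    (∀ w ∈ marr, ∀ k < j, t0[k]! < w) →
    loopA t0 t1 marr j = marr.map (lookupB t0 t1) := by
  intro marr
  induction marr with
  | nil => intro j _ _ _; rfl
  | cons v rest ih =>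
    intro j hj hs hlow
    rw [List.pairwise_cons] at hs
    cases hm : scanB v t0 with
    | some m =>
      obtain ⟨hlen, _, hmin⟩ := scanB_some hm
      have hA : scanA t0 v j = m :=
        scanA_some hm (m - j) j rfl (hlow v (List.mem_cons_self))
      rw [loopA]
      simp only [hA, if_neg (Nat.ne_of_lt hlen)]
      rw [List.map_cons]
      congr 1
      · simp [lookupB, hm]
      · refine ih m (Nat.le_of_lt hlen) hs.2 ?_
        intro w hw k hk
        exact lt_of_lt_of_le (hmin k hk) (hs.1 w hw)
    | none =>
      have hA : scanA t0 v j = t0.length :=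
        scanA_none hm (t0.length - j) j rfl hj
      rw [loopA]
      simp only [hA]
      apply List.map_congr_left
      intro w hw
      have hvw : v ≤ w := by
        rcases List.mem_cons.mp hw with rfl | hw'
        · exact le_refl w
        · exact hs.1 w hw'
      have hBw : scanB w t0 = none := by
        rw [scanB_none_iff]
        intro k hk
        exact lt_of_lt_of_le (scanB_none_iff.mp hm k hk) hvw
      simp [lookupB, hBw]

-- Python's tuple comparison in sorted(zip(...)) is the lexicographic order on Int × Int
lemma sorted2_fst_snd_eq_sorted_lex (xs : List (Int × Int)) :
    PySem.List.sorted2 xs Prod.fst Prod.snd =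
      PySem.List.sorted xs (fun p => toLex p) := by
  rw [PySem.List.sorted_eq_foldl_insertBy]
  have hb : (fun (a b : Int × Int) => decide (a.1 < b.1) || (!decide (b.1 < a.1) && decide (a.2 < b.2)))
      = (fun (a b : Int × Int) => decide (toLex a < toLex b)) := by
    funext a b
    by_cases h1 : a.1 < b.1 <;> by_cases h2 : b.1 < a.1 <;> by_cases h3 : a.2 < b.2 <;>
      simp [Prod.Lex.lt_iff, h1, h2, h3] <;> omega
  show List.foldl (fun acc x => PySem.List.insertBy _ x acc) [] xs = _
  rw [hb]
  rfl

lemma pairwise_snd_zip {α β : Type} {R : β → β → Prop} :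
    ∀ (l1 : List α) (l2 : List β), l2.Pairwise R →
      (l1.zip l2).Pairwise (fun a b => R a.2 b.2) := by
  intro l1
  induction l1 with
  | nil => intro l2 _; simp
  | cons a t1 ih =>
    intro l2 h
    cases l2 with
    | nil => simp
    | cons b t2 =>
      rw [List.pairwise_cons] at h
      rw [List.zip_cons_cons, List.pairwise_cons]
      refine ⟨?_, ih t2 h.2⟩
      intro q hq
      exact h.1 q.2 (List.of_mem_zip hq).2

lemma getTemperature1_eq (table : List (List Int)) (arr : List Int) :
    getTemperature1 table arr = getTemperature1_alt table arr := by
  show (PySem.List.sorted2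
      (((PySem.List.sorted2 (arr.zip (PySem.List.pyRange 0 (arr.length : Int))) Prod.fst Prod.snd).map
          Prod.snd).zip
        (loopA ((PySem.List.pyGet? table 0).getD []) ((PySem.List.pyGet? table 1).getD [])
          (PySem.List.sorted arr (fun x => x)) 0))
      Prod.fst Prod.snd).map Prod.snd =
    arr.map (lookupB ((PySem.List.pyGet? table 0).getD []) ((PySem.List.pyGet? table 1).getD []))
  set t0 := (PySem.List.pyGet? table 0).getD [] with ht0
  set t1 := (PySem.List.pyGet? table 1).getD [] with ht1
  set f := lookupB t0 t1 with hf
  have hnum : PySem.List.pyRange 0 (arr.length : Int) =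
      (List.range arr.length).map (fun k : Nat => (k : Int)) :=
    PySem.List.pyRange_zero_natCast _
  rw [hnum]
  rw [sorted2_fst_snd_eq_sorted_lex (arr.zip ((List.range arr.length).map (fun k : Nat => (k : Int))))]
  set E := arr.zip ((List.range arr.length).map (fun k : Nat => (k : Int))) with hE
  set P := PySem.List.sorted E (fun p => toLex p) with hP
  have hPperm : P.Perm E := PySem.List.sorted_perm E _ false
  have hEfst : E.map Prod.fst = arr := by
    rw [hE]
    exact List.map_fst_zip (by simp)
  -- sorted marr is the first components of the lex-sorted pairs
  have hmarr : PySem.List.sorted arr (fun x => x) = P.map Prod.fst := by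
    apply PySem.List.sorted_id_eq_of_perm_of_pairwise
    · exact hEfst ▸ hPperm.map Prod.fst
    · have := PySem.List.sorted_pairwise E (fun p => toLex p)
      rw [← hP] at this
      rw [List.pairwise_map]
      refine this.imp ?_
      intro a b hab
      rcases Prod.Lex.le_iff.mp hab with h | h
      · exact le_of_lt h
      · exact le_of_eq h.1
  rw [hmarr]
  have hres : loopA t0 t1 (P.map Prod.fst) 0 = P.map (fun p => f p.1) := by
    rw [loopA_eq_map t0 t1 (P.map Prod.fst) 0 (Nat.zero_le _) ?_ (by omega)]
    · rw [List.map_map]; rfl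
    · have := PySem.List.sorted_pairwise E (fun p => toLex p)
      rw [← hP] at this
      rw [List.pairwise_map]
      refine this.imp ?_
      intro a b hab
      rcases Prod.Lex.le_iff.mp hab with h | h
      · exact le_of_lt h
      · exact le_of_eq h.1
  rw [hres]
  rw [List.zip_map']
  rw [sorted2_fst_snd_eq_sorted_lex]
  -- undo the sort: the re-sorted pairs are the pairs in original arr order
  have hsnd : E.Pairwise (fun p q => p.2 < q.2) := by
    apply pairwise_snd_zip
    rw [List.pairwise_map]
    exact List.pairwise_lt_range.imp (fun h => Int.ofNat_lt.mpr h)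
  have htarget : PySem.List.sorted (P.map (fun p => ((p.2 : Int), f p.1))) (fun p => toLex p) =
      E.map (fun p => ((p.2 : Int), f p.1)) := by
    apply PySem.List.sorted_eq_of_perm_of_pairwise_lt
    · exact (hPperm.map (fun p => ((p.2 : Int), f p.1))).symm
    · rw [List.pairwise_map]
      refine hsnd.imp ?_
      intro a b hab
      exact Prod.Lex.lt_iff.mpr (Or.inl hab)
  rw [htarget, List.map_map]
  conv_rhs => rw [← hEfst, List.map_map]
  rfl

-- ===== VERDICT (by name: the statement is the Claim_ definition above) =====
theorem getTemperature1_spec : Claim_equal_getTemperature1 := by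
  intro table arr _ _
  unfold Spec_getTemperature1
  exact getTemperature1_eq table arr
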